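-- pv_equiv track=rewrite | github.com/ShivamMishra33/PythonGames | RPS Game.py | loser
-- ===== SOURCE A (Python) =====
-- def loser(list_):
--     length = len(list_)
--     n = length // 2
--     dict_loser = {}
--     for element in list_:
--         for i in range(n):
--             popped = list_.pop(0)
--             list_.append(popped)
--             dict_loser[list_[n]] = list_[n + 1:]
--
--     return dict_loser
-- ===== SOURCE B (Python) =====
-- def loser(list_):
--     # Single pass: rotating k times puts list_[(k+i) % length] at position i,
--     # and every full cycle of length rotations writes the same key/value pairs,
--     # so one cycle (k = 1..length) determines both the contents and the order.
--     length = len(list_)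
--     n = length // 2
--     if n == 0:
--         return {}
--     dict_loser = {}
--     for k in range(1, length + 1):
--         key = list_[(k + n) % length]
--         dict_loser[key] = [list_[(k + j) % length] for j in range(n + 1, length)]
--     return dict_loser
-- ===== Notes on version B (the rewrite author's own statement) =====
-- stated objective: faster
-- what changed: A performs length*(length//2) pop(0)/append rotation steps, each re-reading the middle element and copying the tail slice; B leaves the list untouched and does a single pass of `length` steps, computing each key and value by modular indexing into the original list (one full cycle of rotations already writes every key with its final value, and repeating the cycle only overwrites entries with identical values).
import Mathlib
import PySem

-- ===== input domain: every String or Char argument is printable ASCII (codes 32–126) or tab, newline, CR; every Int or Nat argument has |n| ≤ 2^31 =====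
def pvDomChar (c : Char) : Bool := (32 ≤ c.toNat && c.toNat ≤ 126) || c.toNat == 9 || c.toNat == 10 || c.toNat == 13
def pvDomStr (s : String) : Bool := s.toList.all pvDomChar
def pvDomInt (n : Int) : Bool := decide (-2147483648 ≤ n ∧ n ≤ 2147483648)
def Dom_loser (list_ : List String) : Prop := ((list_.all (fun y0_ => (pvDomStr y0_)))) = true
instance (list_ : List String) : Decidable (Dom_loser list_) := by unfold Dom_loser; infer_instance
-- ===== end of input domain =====

-- B replaces A's length*(length//2) pop/append rotation steps (each also taking an O(length) tail
-- slice) by ONE pass of `length` modular-index steps over the unchanged list: faster.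
-- A mutates list_ while running but the net rotation is length*(length//2) ≡ 0 (mod length), so A
-- restores list_ before returning; the caller observes no mutation and B performs none.

-- ===== PORT A =====
-- body of A's inner loop: pop(0), append, dict_loser[list_[n]] = list_[n+1:]
def loserStep (n : Nat) (st : List String × PySem.Dict String (List String)) :
    List String × PySem.Dict String (List String) :=
  match PySem.List.pop? st.1 0 with
  | none => st                                   -- unreachable: the loop only runs with list_ nonempty
  | some (popped, rest) =>
    let l := rest ++ [popped]
    match PySem.List.pyGet? l (n : Int) with
    | none => (l, st.2)                          -- unreachable: n < len(list_) whenever the loop runs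
    | some key => (l, st.2.insert key (PySem.List.slice l (some ((n : Int) + 1)) none))

def loser (list_ : List String) : List (String × List String) :=
  let length := list_.length
  let n := length / 2
  -- `for element in list_` iterates by position over a list whose length never changes, and
  -- `element` is unused: the outer loop runs exactly `length` times.
  let st := (List.range length).foldl
    (fun st _ => (List.range n).foldl (fun st _ => loserStep n st) st)
    (list_, (PySem.Dict.empty : PySem.Dict String (List String)))
  st.2.items

-- ===== PORT B =====
def loser_alt (list_ : List String) : List (String × List String) :=
  let length := list_.length
  let n := length / 2
  if n = 0 then []
  else
    -- indices (k+n) % length and (k+j) % length are always in range, so the pyGetD default "" is never used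
    ((PySem.List.pyRange 1 ((length : Int) + 1) 1).foldl
      (fun d k =>
        let key := PySem.List.pyGetD list_ (PySem.Int.mod (k + (n : Int)) (length : Int)) ""
        d.insert key ((PySem.List.pyRange ((n : Int) + 1) (length : Int) 1).map
          (fun j => PySem.List.pyGetD list_ (PySem.Int.mod (k + j) (length : Int)) "")))
      (PySem.Dict.empty : PySem.Dict String (List String))).items

-- ===== PRECONDITION & SPEC =====
def Spec_loser (list_ : List String) (out : List (String × List String)) : Prop := out = loser_alt list_
instance (list_ : List String) (out : List (String × List String)) : Decidable (Spec_loser list_ out) := by unfold Spec_loser; infer_instance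

-- ===== CLAIM (what is proved, stated in full; the proofs are below) =====
def Claim_equal_loser : Prop := ∀ (list_ : List String), Dom_loser list_ → Spec_loser list_ (loser list_)

-- ===== LEMMAS AND PROOFS =====

theorem pv_contains_eq_false_forall {κ ν : Type} [BEq κ] (d : PySem.Dict κ ν) (k : κ)
    (h : ¬ d.contains k = true) : ∀ p ∈ d.items, (p.1 == k) = false := by
  intro p hp
  by_contra hb
  exact h (List.any_eq_true.mpr ⟨p, hp, by simpa using hb⟩)

theorem pv_insert_insert_self {κ ν : Type} [BEq κ] [LawfulBEq κ]
    (d : PySem.Dict κ ν) (k : κ) (v v' : ν) :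
    (d.insert k v).insert k v' = d.insert k v' := by
  apply PySem.Dict.ext
  rw [PySem.Dict.items_insert_of_contains _ _ (PySem.Dict.contains_insert_self d k v)]
  by_cases h : d.contains k = true
  · rw [PySem.Dict.items_insert_of_contains _ _ h, PySem.Dict.items_insert_of_contains _ _ h,
      List.map_map]
    apply List.map_congr_left
    intro p _
    by_cases hp : (p.1 == k) = true <;> simp [hp]
  · rw [PySem.Dict.items_insert_of_not_contains _ _ (by simpa using h),
      PySem.Dict.items_insert_of_not_contains _ _ (by simpa using h)]
    have hall := pv_contains_eq_false_forall d k h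
    rw [List.map_append]
    congr 1
    · apply (List.map_congr_left (g := fun p => p) ?_).trans (List.map_id' _)
      intro p hp
      simp [hall p hp]
    · simp

theorem pv_insert_comm {κ ν : Type} [BEq κ] [LawfulBEq κ]
    (d : PySem.Dict κ ν) {k k' : κ} (v v' : ν) (hne : k' ≠ k) (hk : d.contains k = true) :
    (d.insert k v).insert k' v' = (d.insert k' v').insert k v := by
  have hk2 : (d.insert k' v').contains k = true := by
    rw [PySem.Dict.contains_insert]; simp [hk]
  apply PySem.Dict.ext
  by_cases h' : d.contains k' = true
  · have h'2 : (d.insert k v).contains k' = true := by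
      rw [PySem.Dict.contains_insert]; simp [h']
    rw [PySem.Dict.items_insert_of_contains _ _ h'2,
      PySem.Dict.items_insert_of_contains _ _ hk,
      PySem.Dict.items_insert_of_contains _ _ hk2,
      PySem.Dict.items_insert_of_contains _ _ h', List.map_map, List.map_map]
    apply List.map_congr_left
    intro p _
    by_cases hp : (p.1 == k) = true
    · have hp' : (p.1 == k') = false := by
        have : p.1 = k := by simpa using hp
        simp [this, Ne.symm hne]
      simp [hp, hp', Ne.symm hne]
    · by_cases hq : (p.1 == k') = true <;> simp [hp, hq, hne]
  · have h'2 : (d.insert k v).contains k' = false := by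
      rw [PySem.Dict.contains_insert]
      simp only [Bool.or_eq_false_iff]
      exact ⟨by simpa using hne, by simpa using h'⟩
    rw [PySem.Dict.items_insert_of_not_contains _ _ h'2,
      PySem.Dict.items_insert_of_contains _ _ hk,
      PySem.Dict.items_insert_of_contains _ _ hk2,
      PySem.Dict.items_insert_of_not_contains _ _ (by simpa using h'), List.map_append]
    congr 1
    simp [hne]

theorem pv_insert_eq_self {κ ν : Type} [BEq κ] [LawfulBEq κ]
    (d : PySem.Dict κ ν) (k : κ) (v : ν) (hnd : d.keys.Nodup) (h : d.get? k = some v) :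
    d.insert k v = d := by
  have hc : d.contains k = true := by
    rw [PySem.Dict.contains_eq_isSome_get?, h]; rfl
  apply PySem.Dict.ext
  rw [PySem.Dict.items_insert_of_contains _ _ hc]
  apply (List.map_congr_left (g := fun p => p) ?_).trans (List.map_id' _)
  intro p hp
  by_cases hpk : (p.1 == k) = true
  · have hk : p.1 = k := by simpa using hpk
    have : d.get? k = some p.2 := by
      apply PySem.Dict.get?_of_mem_items _ _ hnd
      simpa [← hk] using hp
    have hv : p.2 = v := by rw [h] at this; exact (Option.some.inj this).symm
    simp only [hpk, if_true]
    rw [← hk, ← hv]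
  · simp [hpk]

def pvF (ps : List (String × List String)) (d : PySem.Dict String (List String)) :
    PySem.Dict String (List String) :=
  ps.foldl (fun d p => d.insert p.1 p.2) d

theorem pv_get?_F_not_mem (ps : List (String × List String)) :
    ∀ (d : PySem.Dict String (List String)) (k : String), k ∉ ps.map Prod.fst →
      (pvF ps d).get? k = d.get? k := by
  induction ps with
  | nil => intro d k _; rfl
  | cons p q ih =>
    intro d k h
    simp only [List.map_cons, List.mem_cons, not_or] at h
    rw [show pvF (p :: q) d = pvF q (d.insert p.1 p.2) from rfl, ih _ _ h.2,
      PySem.Dict.get?_insert_of_ne _ _ h.1]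

theorem pv_contains_F (ps : List (String × List String)) :
    ∀ (d : PySem.Dict String (List String)) (k : String), d.contains k = true →
      (pvF ps d).contains k = true := by
  induction ps with
  | nil => intro d k h; exact h
  | cons p q ih =>
    intro d k h
    rw [show pvF (p :: q) d = pvF q (d.insert p.1 p.2) from rfl]
    exact ih _ _ (by rw [PySem.Dict.contains_insert]; simp [h])

theorem pv_F_insert_absorb (ps : List (String × List String)) :
    ∀ (d : PySem.Dict String (List String)) (k : String) (v : List String),
      k ∈ ps.map Prod.fst → d.contains k = true → pvF ps (d.insert k v) = pvF ps d := by
  induction ps with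
  | nil => intro d k v h _; simp at h
  | cons p q ih =>
    intro d k v h hc
    by_cases hk : p.1 = k
    · show pvF q ((d.insert k v).insert p.1 p.2) = pvF q (d.insert p.1 p.2)
      rw [hk, pv_insert_insert_self]
    · have hmem : k ∈ q.map Prod.fst := by
        simp only [List.map_cons, List.mem_cons] at h
        exact h.resolve_left (fun hh => hk hh.symm)
      show pvF q ((d.insert k v).insert p.1 p.2) = pvF q (d.insert p.1 p.2)
      rw [pv_insert_comm d v p.2 hk hc]
      exact ih _ _ _ hmem (by rw [PySem.Dict.contains_insert]; simp [hc])

theorem pv_F_idem (ps : List (String × List String)) :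
    ∀ (d : PySem.Dict String (List String)), d.keys.Nodup → pvF ps (pvF ps d) = pvF ps d := by
  induction ps with
  | nil => intro d _; rfl
  | cons p q ih =>
    intro d hnd
    have hstep : ∀ e, pvF (p :: q) e = pvF q (e.insert p.1 p.2) := fun _ => rfl
    rw [hstep, hstep]
    set e := d.insert p.1 p.2 with he
    have hend : e.keys.Nodup := PySem.Dict.nodup_keys_insert _ _ _ hnd
    by_cases hm : p.1 ∈ q.map Prod.fst
    · have hc : (pvF q e).contains p.1 = true :=
        pv_contains_F q e p.1 (by rw [he]; exact PySem.Dict.contains_insert_self d p.1 p.2)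
      rw [pv_F_insert_absorb q _ _ _ hm hc]
      exact ih _ hend
    · have hg : (pvF q e).get? p.1 = some p.2 := by
        rw [pv_get?_F_not_mem q e p.1 hm, he, PySem.Dict.get?_insert_self]
      have hnodup : (pvF q e).keys.Nodup := by
        have := PySem.Dict.nodup_keys_foldl_insert_key q Prod.fst (fun _ p => p.2) e hend
        exact this
      rw [pv_insert_eq_self _ _ _ hnodup hg]
      exact ih _ hend

def pvPair (xs : List String) (k : Nat) : String × List String :=
  ((xs.rotate k).getD (xs.length / 2) "", (xs.rotate k).drop (xs.length / 2 + 1))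

def pvPairs (xs : List String) (m : Nat) : List (String × List String) :=
  (List.range m).map (fun i => pvPair xs (i + 1))

theorem pv_foldl_const {α β : Type} (l : List α) (f : β → β) (s : β) :
    l.foldl (fun s _ => f s) s = f^[l.length] s := by
  induction l generalizing s with
  | nil => rfl
  | cons x t ih => simpa [Function.iterate_succ_apply] using ih (f s)

theorem pv_step_rotate (xs : List String) (h2 : 2 ≤ xs.length) (k : Nat)
    (d : PySem.Dict String (List String)) :
    loserStep (xs.length / 2) (xs.rotate k, d) =
      (xs.rotate (k + 1), d.insert (pvPair xs (k + 1)).1 (pvPair xs (k + 1)).2) := by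
  have hlen : (xs.rotate k).length = xs.length := List.length_rotate xs k
  have hne : xs.rotate k ≠ [] := by
    intro h; rw [h] at hlen; simp at hlen; omega
  obtain ⟨y, ys, heq⟩ := List.exists_cons_of_ne_nil hne
  have hrot : ys ++ [y] = xs.rotate (k + 1) := by
    rw [← List.rotate_rotate, heq]
    simp [List.rotate_cons_succ]
  set n := xs.length / 2 with hn
  have hnlt : n < xs.length := Nat.div_lt_self (by omega) (by omega)
  have hlen2 : (ys ++ [y]).length = xs.length := by
    rw [hrot]; exact List.length_rotate xs (k+1)
  have hget : PySem.List.pyGet? (ys ++ [y]) (n : Int) = some ((ys ++ [y]).getD n "") := by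
    rw [PySem.List.pyGet?_natCast, List.getElem?_eq_getElem (by omega),
      List.getD_eq_getElem _ _ (by omega)]
  show loserStep n (xs.rotate k, d) = _
  rw [heq]
  unfold loserStep
  simp only [PySem.List.pop?_zero_cons, hget]
  have hcast : ((n : Int) + 1) = ((n + 1 : Nat) : Int) := by push_cast; ring
  rw [hcast, PySem.List.slice_from_natCast]
  unfold pvPair
  rw [← hrot, ← hn]

theorem pv_iterA (xs : List String) (h2 : 2 ≤ xs.length) (m : Nat) :
    (loserStep (xs.length / 2))^[m] (xs, (PySem.Dict.empty : PySem.Dict String (List String))) =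
      (xs.rotate m, pvF (pvPairs xs m) PySem.Dict.empty) := by
  induction m with
  | zero => simp [pvPairs, pvF]
  | succ m ih =>
    rw [Function.iterate_succ_apply', ih, pv_step_rotate xs h2 m]
    congr 1
    unfold pvPairs
    rw [List.range_succ, List.map_append, List.map_cons, List.map_nil]
    unfold pvF
    rw [List.foldl_append]
    rfl

theorem pv_pair_period (xs : List String) (k c : Nat) :
    pvPair xs (k + c * xs.length) = pvPair xs k := by
  unfold pvPair
  have : xs.rotate (k + c * xs.length) = xs.rotate k := by
    rw [← List.rotate_mod xs (k + c * xs.length), Nat.add_mul_mod_self_right,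
      List.rotate_mod]
  rw [this]

theorem pv_blocks (xs : List String) (c : Nat) :
    pvF (pvPairs xs ((c + 1) * xs.length)) PySem.Dict.empty =
      pvF (pvPairs xs xs.length) PySem.Dict.empty := by
  induction c with
  | zero => simp
  | succ c ih =>
    have hsplit : pvPairs xs ((c + 2) * xs.length) =
        pvPairs xs ((c + 1) * xs.length) ++ pvPairs xs xs.length := by
      unfold pvPairs
      have : (c + 2) * xs.length = (c + 1) * xs.length + xs.length := by ring
      rw [this, List.range_add, List.map_append, List.map_map]
      congr 1
      apply List.map_congr_left
      intro i _
      show pvPair xs ((c + 1) * xs.length + i + 1) = pvPair xs (i + 1)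
      have : (c + 1) * xs.length + i + 1 = (i + 1) + (c + 1) * xs.length := by ring
      rw [this, pv_pair_period]
    rw [hsplit]
    unfold pvF
    rw [List.foldl_append]
    show pvF (pvPairs xs xs.length) (pvF (pvPairs xs ((c+1) * xs.length)) PySem.Dict.empty) = _
    rw [ih, (fun ps => pv_F_idem ps PySem.Dict.empty PySem.Dict.nodup_keys_empty)]
    rfl

theorem pv_rot_getD (xs : List String) (k i : Nat) (h : i < xs.length) :
    (xs.rotate k).getD i "" = xs.getD ((i + k) % xs.length) "" := by
  have h0 : 0 < xs.length := by omega
  rw [List.getD_eq_getElem _ _ (by simpa using h),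
    List.getD_eq_getElem _ _ (Nat.mod_lt _ h0)]
  exact List.getElem_rotate xs k i (by simpa using h)

theorem pv_getD_int (xs : List String) (m : Nat) :
    PySem.List.pyGetD xs (PySem.Int.mod (m : Int) (xs.length : Int)) "" =
      xs.getD (m % xs.length) "" := by
  rw [PySem.Int.mod_natCast, PySem.List.pyGetD_natCast]

theorem pv_alt_key (xs : List String) (h2 : 2 ≤ xs.length) (t : Nat) :
    PySem.List.pyGetD xs
        (PySem.Int.mod ((1 + (t : Int)) + ((xs.length / 2 : Nat) : Int)) (xs.length : Int)) "" =
      (pvPair xs (t + 1)).1 := by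
  set n := xs.length / 2 with hn
  have hnlt : n < xs.length := Nat.div_lt_self (by omega) (by omega)
  have hc : (1 + (t : Int)) + ((n : Nat) : Int) = ((1 + t + n : Nat) : Int) := by push_cast; ring
  rw [hc, pv_getD_int]
  show _ = (xs.rotate (t+1)).getD n ""
  rw [pv_rot_getD xs (t+1) n hnlt]
  have hidx : 1 + t + n = n + (t + 1) := by omega
  rw [hidx]

theorem pv_alt_val (xs : List String) (h2 : 2 ≤ xs.length) (t : Nat) :
    (PySem.List.pyRange (((xs.length / 2 : Nat) : Int) + 1) ((xs.length : Nat) : Int) 1).map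
        (fun j => PySem.List.pyGetD xs (PySem.Int.mod ((1 + (t : Int)) + j) (xs.length : Int)) "") =
      (pvPair xs (t + 1)).2 := by
  set n := xs.length / 2 with hn
  set L := xs.length with hL
  have hnlt : n < L := Nat.div_lt_self (by omega) (by omega)
  have h0 : 0 < L := by omega
  rw [PySem.List.pyRange_one, List.map_map]
  have htn : ((L : Int) - ((n : Int) + 1)).toNat = L - (n + 1) := by omega
  rw [htn]
  show _ = (xs.rotate (t+1)).drop (n + 1)
  apply List.ext_getElem
  · simp [hL]
  · intro i h1 h2'
    simp only [List.getElem_map, List.getElem_range, Function.comp_apply]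
    have hc : (1 + (t : Int)) + (((n : Int) + 1) + (i : Int)) = ((1 + t + n + 1 + i : Nat) : Int) := by
      push_cast; ring
    rw [hc, pv_getD_int]
    rw [List.getElem_drop, List.getElem_rotate]
    have hidx : 1 + t + n + 1 + i = n + 1 + i + (t + 1) := by omega
    rw [hidx]
    exact List.getD_eq_getElem _ _ (Nat.mod_lt _ h0)

theorem pv_alt_eq (xs : List String) (h2 : 2 ≤ xs.length) :
    loser_alt xs = (pvF (pvPairs xs xs.length) PySem.Dict.empty).items := by
  have hn0 : ¬ xs.length / 2 = 0 := by omega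
  show (if xs.length / 2 = 0 then ([] : List (String × List String)) else _) = _
  rw [if_neg hn0]
  have htoNat : ((xs.length : Int) + 1 - 1).toNat = xs.length := by omega
  rw [PySem.List.pyRange_one 1 ((xs.length : Int) + 1), htoNat, List.foldl_map]
  show (((List.range xs.length).foldl _ PySem.Dict.empty)).items = _
  unfold pvF pvPairs
  rw [List.foldl_map]
  congr 1
  apply PySem.List.foldl_congr_mem
  intro d t _
  show d.insert _ _ = _
  rw [pv_alt_key xs h2 t, pv_alt_val xs h2 t]

theorem pv_foldl_id {α β : Type} (l : List α) (s : β) :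
    l.foldl (fun s _ => s) s = s := by
  induction l generalizing s with
  | nil => rfl
  | cons x t ih => simp only [List.foldl_cons]; exact ih s

theorem loser_eq (xs : List String) : loser xs = loser_alt xs := by
  by_cases hL : xs.length / 2 = 0
  · show ((List.range xs.length).foldl
      (fun st _ => (List.range (xs.length / 2)).foldl (fun st _ => loserStep (xs.length / 2) st) st)
      (xs, PySem.Dict.empty)).2.items = _
    rw [hL]
    simp only [List.range_zero, List.foldl_nil]
    rw [pv_foldl_id]
    show ([] : List (String × List String)) = _
    show _ = (if xs.length / 2 = 0 then ([] : List (String × List String)) else _)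
    rw [if_pos hL]
  · have h2 : 2 ≤ xs.length := by omega
    set n := xs.length / 2 with hn
    show ((List.range xs.length).foldl
      (fun st _ => (List.range n).foldl (fun st _ => loserStep n st) st)
      (xs, PySem.Dict.empty)).2.items = _
    have hinner : (fun (st : List String × PySem.Dict String (List String)) (_ : Nat) =>
        (List.range n).foldl (fun st _ => loserStep n st) st) =
        (fun st _ => (loserStep n)^[n] st) := by
      funext st _
      rw [pv_foldl_const (List.range n) (loserStep n) st, List.length_range]
    rw [hinner, pv_foldl_const _ ((loserStep n)^[n]) _, List.length_range,
      ← Function.iterate_mul, pv_iterA xs h2 (n * xs.length)]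
    show (pvF (pvPairs xs (n * xs.length)) PySem.Dict.empty).items = _
    have hm : ((n - 1) + 1) * xs.length = n * xs.length :=
      congrArg (· * xs.length) (Nat.sub_add_cancel (by omega))
    rw [← hm, pv_blocks xs (n - 1), pv_alt_eq xs h2]


-- ===== VERDICT (by name: the statement is the Claim_ definition above) =====
theorem loser_spec : Claim_equal_loser := by
  intro xs _
  unfold Spec_loser
  exact loser_eq xs
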